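-- pv_equiv track=rewrite | github.com/chatterjee-sid/CodeSVNIT | cs232/Lab_6/Genetic Algorithm M1.py | fitness_evaluation
-- ===== SOURCE A (Python) =====
-- def fitness_evaluation(gene):
--     """
--     The fitness function used here will be dependent on the number of
--     non-attacking pairs. For an 8x8 chess board, the maximum fitness
--     value possible is 28 (i.e. 8*(8-1)/2). The minimum is, obviously,
--     0.
--     """
--     attacking_pairs = 0
--     # counting column wise attacks
--     column_wise = {}
--     for i in gene:
--         column_wise[i] = column_wise.get(i,0) + 1
--     for i in column_wise:
--         k = column_wise[i]
--         attacking_pairs += k*(k-1)//2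
--     # counting left-down-right-up diagonal attacks
--     front_slash_diagonal = {}
--     for i in range(8):
--         k = gene[i] - i
--         front_slash_diagonal[k] = front_slash_diagonal.get(k,0) + 1
--     for i in front_slash_diagonal:
--         k = front_slash_diagonal[i]
--         attacking_pairs += k*(k-1)//2
--     # count left-up-right-down diagonal attacks
--     back_slash_diagonal = {}
--     for i in range(8):
--         k = gene[i] + i
--         back_slash_diagonal[k] = back_slash_diagonal.get(k,0) + 1
--     for i in back_slash_diagonal:
--         k = back_slash_diagonal[i]
--         attacking_pairs += k*(k-1)//2
--     return 28 - attacking_pairs #non-attacking pairs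
-- ===== SOURCE B (Python) =====
-- def fitness_evaluation(gene):
--     def attacking_pairs(values):
--         # pairs of equal values: sort, then each element extends a run of equals
--         pairs = 0
--         run = 0
--         prev = None
--         for v in sorted(values):
--             run = run + 1 if v == prev else 1
--             prev = v
--             pairs += run - 1
--         return pairs
--     attacking = (attacking_pairs(gene)
--                  + attacking_pairs([gene[i] - i for i in range(8)])
--                  + attacking_pairs([gene[i] + i for i in range(8)]))
--     return 28 - attacking
-- ===== Notes on version B (the rewrite author's own statement) =====
-- stated objective: alternative
-- what changed: Replaces the three hash-map bucket counters summed with k*(k-1)//2 by one sort-then-scan helper that counts equal pairs via runs in the sorted value list, applied to the column values and the two diagonal key lists.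
import Mathlib
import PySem

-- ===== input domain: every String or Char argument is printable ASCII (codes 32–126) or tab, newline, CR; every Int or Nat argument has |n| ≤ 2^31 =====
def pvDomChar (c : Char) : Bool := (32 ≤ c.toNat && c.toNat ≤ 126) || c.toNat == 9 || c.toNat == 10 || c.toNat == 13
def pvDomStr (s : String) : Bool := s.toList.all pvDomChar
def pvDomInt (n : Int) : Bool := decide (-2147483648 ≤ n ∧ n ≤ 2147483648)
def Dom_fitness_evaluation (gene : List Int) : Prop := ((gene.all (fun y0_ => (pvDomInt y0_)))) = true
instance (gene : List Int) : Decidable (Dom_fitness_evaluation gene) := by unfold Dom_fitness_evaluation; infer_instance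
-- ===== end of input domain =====

-- B replaces A's three hash-map bucket counters by one sort-then-scan equal-pair counter applied to the column values and the two diagonal key lists (alternative algorithm, not claimed faster).

-- ===== PORT A =====
-- literal transliteration of A: three counting dicts, then sum k*(k-1)//2 over each
def fitness_evaluation (gene : List Int) : Int :=
  let column_wise := gene.foldl (fun d i => d.insert i (d.getD i 0 + 1)) PySem.Dict.empty
  let attacking1 := column_wise.keys.foldl
    (fun a i => let k := column_wise.getD i 0; a + PySem.Int.floordiv (k * (k - 1)) 2) 0
  let front_slash_diagonal := (PySem.List.pyRange 0 8 1).foldl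
    (fun d i => let k := PySem.List.pyGetD gene i 0 - i; d.insert k (d.getD k 0 + 1)) PySem.Dict.empty
  let attacking2 := front_slash_diagonal.keys.foldl
    (fun a i => let k := front_slash_diagonal.getD i 0; a + PySem.Int.floordiv (k * (k - 1)) 2) attacking1
  let back_slash_diagonal := (PySem.List.pyRange 0 8 1).foldl
    (fun d i => let k := PySem.List.pyGetD gene i 0 + i; d.insert k (d.getD k 0 + 1)) PySem.Dict.empty
  let attacking3 := back_slash_diagonal.keys.foldl
    (fun a i => let k := back_slash_diagonal.getD i 0; a + PySem.Int.floordiv (k * (k - 1)) 2) attacking2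
  28 - attacking3

-- ===== PORT B =====
-- Source B's helper attacking_pairs: sort, then one scan with state (pairs, run, prev)
def pvAttackingPairs (values : List Int) : Int :=
  ((PySem.List.sorted values (fun x => x) false).foldl
    (fun (st : Int × Int × Option Int) v =>
      let run := if st.2.2 = some v then st.2.1 + 1 else 1
      (st.1 + run - 1, run, some v)) (0, 0, (none : Option Int))).1

-- literal transliteration of Source B
def fitness_evaluation_alt (gene : List Int) : Int :=
  let attacking := pvAttackingPairs gene
    + pvAttackingPairs ((PySem.List.pyRange 0 8 1).map (fun i => PySem.List.pyGetD gene i 0 - i))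
    + pvAttackingPairs ((PySem.List.pyRange 0 8 1).map (fun i => PySem.List.pyGetD gene i 0 + i))
  28 - attacking

-- ===== PRECONDITION & SPEC =====
-- Both Pythons index gene[0..7] for the diagonals, so they raise IndexError on lists with
-- fewer than 8 entries; exactly those inputs are excluded (A returns on every list of length ≥ 8).
def Pre_fitness_evaluation (gene : List Int) : Prop := 8 ≤ gene.length
instance (gene : List Int) : Decidable (Pre_fitness_evaluation gene) := by unfold Pre_fitness_evaluation; infer_instance
def pvWitness_fitness_evaluation : List Int := [0, 1, 2, 3, 4, 5, 6, 7]

def Spec_fitness_evaluation (gene : List Int) (out : Int) : Prop := out = fitness_evaluation_alt gene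
instance (gene : List Int) (out : Int) : Decidable (Spec_fitness_evaluation gene out) := by unfold Spec_fitness_evaluation; infer_instance

-- ===== CLAIM (what is proved, stated in full; the proofs are below) =====
def Claim_equal_fitness_evaluation : Prop := ∀ (gene : List Int), Dom_fitness_evaluation gene → Pre_fitness_evaluation gene → Spec_fitness_evaluation gene (fitness_evaluation gene)

-- ===== LEMMAS AND PROOFS =====

-- number of unordered pairs of equal entries in a list
def pvPC : List Int → Int
  | [] => 0
  | x :: xs => (xs.count x : Int) + pvPC xs

theorem pvPC_perm {xs ys : List Int} (h : xs.Perm ys) : pvPC xs = pvPC ys := by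
  induction h with
  | nil => rfl
  | cons x h ih => simp [pvPC, ih, h.count_eq]
  | swap x y l =>
      by_cases hxy : x = y
      · subst hxy; rfl
      · simp [pvPC, hxy, Ne.symm hxy]; ring
  | trans h1 h2 ih1 ih2 => exact ih1.trans ih2

theorem pvPC_append_singleton (xs : List Int) (x : Int) :
    pvPC (xs ++ [x]) = pvPC xs + (xs.count x : Int) := by
  induction xs with
  | nil => simp [pvPC]
  | cons y ys ih =>
      simp [pvPC, ih, List.count_append, List.count_singleton]
      by_cases h : x = y <;> simp [h, eq_comm] <;> ring

-- the k*(k-1)//2 recurrence behind incrementing one bucket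
theorem pvC2_succ (k : Int) :
    PySem.Int.floordiv ((k + 1) * (k + 1 - 1)) 2 = PySem.Int.floordiv (k * (k - 1)) 2 + k := by
  rw [PySem.Int.floordiv_eq_ediv_of_pos (by omega), PySem.Int.floordiv_eq_ediv_of_pos (by omega)]
  have h : (k + 1) * (k + 1 - 1) = k * (k - 1) + k * 2 := by ring
  rw [h, Int.add_mul_ediv_right _ _ (by omega)]

-- A's bucket sum Σ_v k_v*(k_v-1)//2 over the distinct values equals the equal-pair count
theorem pvL (xs : List Int) :
    ((PySem.Set.ofList xs).map (fun v =>
      PySem.Int.floordiv ((xs.count v : Int) * ((xs.count v : Int) - 1)) 2)).sum = pvPC xs := by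
  induction xs using List.reverseRecOn with
  | nil => simp [PySem.Set.ofList_nil, pvPC]
  | append_singleton ys y ih =>
    rw [pvPC_append_singleton, PySem.Set.ofList_append_singleton]
    by_cases hy : y ∈ ys
    · have hyS : y ∈ PySem.Set.ofList ys := (PySem.Set.mem_ofList ys y).mpr hy
      rw [PySem.Set.add_of_mem hyS]
      have hnd := PySem.Set.nodup_ofList ys
      have hperm := List.perm_cons_erase hyS
      have key : ∀ f : Int → Int, ((PySem.Set.ofList ys).map f).sum
          = f y + (((PySem.Set.ofList ys).erase y).map f).sum := by
        intro f
        rw [(hperm.map f).sum_eq, List.map_cons, List.sum_cons]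
      rw [key] at ih ⊢
      have hcy : List.count y (ys ++ [y]) = List.count y ys + 1 := by
        simp [List.count_append]
      have htail : (((PySem.Set.ofList ys).erase y).map (fun v =>
            PySem.Int.floordiv ((List.count v (ys ++ [y]) : Int) * ((List.count v (ys ++ [y]) : Int) - 1)) 2))
          = (((PySem.Set.ofList ys).erase y).map (fun v =>
            PySem.Int.floordiv ((List.count v ys : Int) * ((List.count v ys : Int) - 1)) 2)) := by
        apply List.map_congr_left
        intro v hv
        have hvny : v ≠ y := ((hnd.mem_erase_iff).mp hv).1
        have : List.count v (ys ++ [y]) = List.count v ys := by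
          simp [List.count_append, hvny.symm]
        rw [this]
      rw [hcy, htail]
      push_cast
      rw [pvC2_succ ((List.count y ys : Int))]
      linarith [ih]
    · have hyS : y ∉ PySem.Set.ofList ys := fun h => hy ((PySem.Set.mem_ofList ys y).mp h)
      rw [PySem.Set.add_of_not_mem hyS]
      rw [List.map_append, List.sum_append]
      have hcy0 : List.count y ys = 0 := List.count_eq_zero_of_not_mem hy
      have htail : ((PySem.Set.ofList ys).map (fun v =>
            PySem.Int.floordiv ((List.count v (ys ++ [y]) : Int) * ((List.count v (ys ++ [y]) : Int) - 1)) 2))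
          = ((PySem.Set.ofList ys).map (fun v =>
            PySem.Int.floordiv ((List.count v ys : Int) * ((List.count v ys : Int) - 1)) 2)) := by
        apply List.map_congr_left
        intro v hv
        have hvny : v ≠ y := fun h => hy (h ▸ (PySem.Set.mem_ofList ys v).mp hv)
        have : List.count v (ys ++ [y]) = List.count v ys := by
          simp [List.count_append, hvny.symm]
        rw [this]
      rw [htail, ih]
      simp [List.count_append, hcy0, PySem.Int.floordiv]

-- A's diagonal dict-building loop is the counter of the mapped key list
theorem pv_diag_counter (f : Int → Int) (a b : Int) :
    (PySem.List.pyRange a b 1).foldl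
        (fun d i => d.insert (f i) (d.getD (f i) 0 + 1)) PySem.Dict.empty
      = PySem.Dict.counter ((PySem.List.pyRange a b 1).map f) := by
  rw [← PySem.Dict.foldl_insert_getD_add_one_eq_counter, List.foldl_map]

-- A's summation loop over a counting dict yields acc + pair count
theorem pv_dictsum (xs : List Int) (acc : Int) :
    (PySem.Dict.counter xs).keys.foldl
      (fun a i => a + PySem.Int.floordiv ((PySem.Dict.counter xs).getD i 0 *
        ((PySem.Dict.counter xs).getD i 0 - 1)) 2) acc
    = acc + pvPC xs := by
  rw [PySem.List.foldl_add, PySem.Dict.keys_counter]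
  congr 1
  rw [← pvL xs]
  apply congrArg List.sum
  apply List.map_congr_left
  intro v _
  rw [PySem.Dict.getD_counter]

-- in a (≤)-sorted list every element is at most the last one
theorem pv_le_getLast (l : List Int) (h : l.Pairwise (· ≤ ·)) :
    ∀ a ∈ l, ∀ x, l.getLast? = some x → a ≤ x := by
  induction l with
  | nil => intro a ha; simp at ha
  | cons b l ih =>
      intro a ha x hx
      rcases List.pairwise_cons.mp h with ⟨hb, hl⟩
      cases l with
      | nil => simp at hx ha; omega
      | cons c l' =>
          rw [List.getLast?_cons_cons] at hx
          rcases List.mem_cons.mp ha with rfl | ha'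
          · exact hb x (List.mem_of_getLast? hx)
          · exact ih hl a ha' x hx

-- Source B's scan step as a named function (definitionally the lambda in pvAttackingPairs)
def pvStep (st : Int × Int × Option Int) (v : Int) : Int × Int × Option Int :=
  let run := if st.2.2 = some v then st.2.1 + 1 else 1
  (st.1 + run - 1, run, some v)

-- invariant of the scan over a sorted list: pairs so far, run length of the last value, last value
theorem pvScan_sorted : ∀ (l : List Int), l.Pairwise (· ≤ ·) →
    l.foldl pvStep (0, 0, (none : Option Int)) =
      (pvPC l,
       (match l.getLast? with | none => 0 | some x => (l.count x : Int)),
       l.getLast?) := by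
  intro l
  induction l using List.reverseRecOn with
  | nil => intro _; rfl
  | append_singleton l x ih =>
      intro hs
      rcases List.pairwise_append.mp hs with ⟨hl, _, hle⟩
      rw [List.foldl_append, ih hl, List.foldl_cons, List.foldl_nil]
      cases hL : l.getLast? with
      | none =>
          have hnil : l = [] := by cases l <;> simp_all
          subst hnil
          simp [pvStep, pvPC]
      | some last =>
          have hlast_mem : last ∈ l := List.mem_of_getLast? hL
          by_cases hx : x = last
          · subst hx
            simp only [pvStep]
            simp [pvPC_append_singleton, List.count_append, List.getLast?_append]
            omega
          · have hxnot : x ∉ l := by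
              intro hmem
              have h1 : x ≤ last := pv_le_getLast l hl x hmem last hL
              have h2 : last ≤ x := hle last hlast_mem x (by simp)
              exact hx (le_antisymm h1 h2)
            have hc0 : l.count x = 0 := List.count_eq_zero_of_not_mem hxnot
            simp only [pvStep]
            simp [pvPC_append_singleton, List.count_append, List.getLast?_append, hc0]
            constructor
            · rw [if_neg (by simp [Ne.symm hx])]; ring
            · intro h; exact absurd h.symm hx

-- B's helper counts exactly the equal pairs of its argument
theorem pvAP_eq (xs : List Int) : pvAttackingPairs xs = pvPC xs := by
  unfold pvAttackingPairs
  have hp : (PySem.List.sorted xs (fun x => x) false).Pairwise (· ≤ ·) :=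
    PySem.List.sorted_pairwise xs (fun x => x)
  rw [show (fun (st : Int × Int × Option Int) v =>
      let run := if st.2.2 = some v then st.2.1 + 1 else 1
      (st.1 + run - 1, run, some v)) = pvStep from rfl]
  rw [pvScan_sorted _ hp]
  exact pvPC_perm (PySem.List.sorted_perm xs (fun x => x) false)

theorem pv_spec_core (gene : List Int) :
    fitness_evaluation gene = fitness_evaluation_alt gene := by
  unfold fitness_evaluation fitness_evaluation_alt
  simp only [PySem.Dict.foldl_insert_getD_add_one_eq_counter, pv_diag_counter, pv_dictsum,
    pvAP_eq]
  ring

-- ===== VERDICT (by name: the statement is the Claim_ definition above) =====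
theorem fitness_evaluation_spec : Claim_equal_fitness_evaluation := by
  intro gene _ _
  exact pv_spec_core gene
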